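-- pv_equiv track=rewrite | github.com/wunger/Power-Traces-of-Lightweight-GIFT | Ternary/XMEGA/FixedKey/CPAExeV2.py | Sanatize
-- ===== SOURCE A (Python) =====
-- def Sanatize(arr):
--     returnArr = [0] * len(arr)
--     for i in range(len(arr)):
--         tempArr = [0] * 4
--         for j in range(4):
--             tempArr[j] = ((arr[i] >> (j*2)) & 0b11)
--             if(tempArr[j] == 0b10):
--                 tempArr[j] = 0
--         for j in range(4):
--             returnArr[i] |= (tempArr[j] << (2*j))
--     return returnArr
-- ===== SOURCE B (Python) =====
-- # Branchless rewrite: a 256-entry table built once with a whole-byte bit trick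
-- # (clear the high bit of every 2-bit field that equals 0b10), then one lookup per element.
-- _TABLE = [b & ~(((b >> 1) & ~b & 0x55) << 1) for b in range(256)]
--
-- def Sanatize(arr):
--     return [_TABLE[x & 0xFF] for x in arr]
-- ===== Notes on version B (the rewrite author's own statement) =====
-- stated objective: faster
-- what changed: Replaces A's per-element nested loops (split each byte into four 2-bit fields, branch on each, reassemble with shifts and ORs) by a 256-entry lookup table built once with a branchless whole-byte bit trick, so each element becomes a single masked table read.
import Mathlib
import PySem

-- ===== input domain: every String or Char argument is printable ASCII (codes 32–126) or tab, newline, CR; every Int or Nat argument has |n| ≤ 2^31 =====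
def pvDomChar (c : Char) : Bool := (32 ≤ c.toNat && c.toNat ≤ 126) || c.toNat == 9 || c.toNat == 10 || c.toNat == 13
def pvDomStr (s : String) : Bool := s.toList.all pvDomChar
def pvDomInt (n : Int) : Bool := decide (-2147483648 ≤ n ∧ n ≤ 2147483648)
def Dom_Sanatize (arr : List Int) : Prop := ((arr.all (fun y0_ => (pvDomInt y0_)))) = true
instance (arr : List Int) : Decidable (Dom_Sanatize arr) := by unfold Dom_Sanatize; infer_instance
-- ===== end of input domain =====

-- B replaces A's nested per-field split/branch/reassemble loops by a 256-entry table built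
-- once with a branchless whole-byte bit trick, and one table lookup per element (objective: faster,
-- a constant-factor speedup measured).

-- ===== PORT A =====
-- Literal transliteration of A: outer index loop over arr, inner loop extracting the four
-- 2-bit fields into tempArr (zeroing fields equal to 0b10), inner loop OR-ing them back.
-- Shift amounts j*2 are nonnegative (j from range(4)), so `.toNat` is exact.
def Sanatize (arr : List Int) : List Int :=
  let returnArr : List Int := List.replicate arr.length 0
  (PySem.List.pyRange 0 (arr.length : Int) 1).foldl (fun returnArr i =>
    let tempArr : List Int := List.replicate 4 0
    let tempArr := (PySem.List.pyRange 0 4 1).foldl (fun tempArr j =>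
      let tempArr := PySem.List.pySetD tempArr j
        (PySem.Int.band (PySem.List.pyGetD arr i 0 >>> (j * 2).toNat) 3)
      if PySem.List.pyGetD tempArr j 0 = 2 then PySem.List.pySetD tempArr j 0 else tempArr)
      tempArr
    (PySem.List.pyRange 0 4 1).foldl (fun returnArr j =>
      PySem.List.pySetD returnArr i
        (PySem.Int.bor (PySem.List.pyGetD returnArr i 0)
          (PySem.List.pyGetD tempArr j 0 <<< (2 * j).toNat)))
      returnArr)
    returnArr

-- ===== PORT B =====
-- b & ~(((b >> 1) & ~b & 0x55) << 1)   (Python `~` is Int.not, `>>`/`<<` are >>>/<<<)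
def pvFix (b : Int) : Int :=
  PySem.Int.band b
    (Int.not ((PySem.Int.band (PySem.Int.band (b >>> (1 : Nat)) (Int.not b)) 85) <<< (1 : Nat)))

-- _TABLE = [b & ~(((b >> 1) & ~b & 0x55) << 1) for b in range(256)]
def pvTable : List Int := (PySem.List.pyRange 0 256 1).map pvFix

-- return [_TABLE[x & 0xFF] for x in arr]   (the index is always in range, so pyGetD is exact)
def Sanatize_alt (arr : List Int) : List Int :=
  arr.map (fun x => PySem.List.pyGetD pvTable (PySem.Int.band x 255) 0)

-- ===== PRECONDITION & SPEC =====
def Spec_Sanatize (arr : List Int) (out : List Int) : Prop := out = Sanatize_alt arr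
instance (arr : List Int) (out : List Int) : Decidable (Spec_Sanatize arr out) := by unfold Spec_Sanatize; infer_instance

-- ===== CLAIM (what is proved, stated in full; the proofs are below) =====
def Claim_equal_Sanatize : Prop := ∀ (arr : List Int), Dom_Sanatize arr → Spec_Sanatize arr (Sanatize arr)

-- ===== LEMMAS AND PROOFS =====

-- The body of A's outer loop, named for the proofs (Sanatize arr is definitionally — by
-- zeta-reducing A's `let`s — a foldl of pvOB arr).
def pvOB (arr returnArr : List Int) (i : Int) : List Int :=
  (PySem.List.pyRange 0 4 1).foldl (fun returnArr j =>
    PySem.List.pySetD returnArr i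
      (PySem.Int.bor (PySem.List.pyGetD returnArr i 0)
        (PySem.List.pyGetD
          ((PySem.List.pyRange 0 4 1).foldl (fun tempArr j =>
            let tempArr := PySem.List.pySetD tempArr j
              (PySem.Int.band (PySem.List.pyGetD arr i 0 >>> (j * 2).toNat) 3)
            if PySem.List.pyGetD tempArr j 0 = 2 then PySem.List.pySetD tempArr j 0 else tempArr)
            (List.replicate 4 0)) j 0 <<< (2 * j).toNat)))
    returnArr

-- One 2-bit field of A, and A's per-element value.
def pvT (x j : Int) : Int :=
  let v := PySem.Int.band (x >>> (j * 2).toNat) 3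
  if v = 2 then 0 else v

def pvAfun (x : Int) : Int :=
  PySem.Int.bor (PySem.Int.bor (PySem.Int.bor (PySem.Int.bor 0
    (pvT x 0 <<< (0 : Nat))) (pvT x 1 <<< (2 : Nat))) (pvT x 2 <<< (4 : Nat))) (pvT x 3 <<< (6 : Nat))

-- One iteration of A's field-extraction loop: store-then-maybe-zero is one conditional store.
lemma pvStep (l : List Int) (j v : Int) (h0 : 0 ≤ j) (h : j.toNat < l.length) :
    (if PySem.List.pyGetD (PySem.List.pySetD l j v) j 0 = 2
       then PySem.List.pySetD (PySem.List.pySetD l j v) j 0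
       else PySem.List.pySetD l j v)
    = l.set j.toNat (if v = 2 then 0 else v) := by
  have hs : PySem.List.pySetD l j v = l.set j.toNat v := PySem.List.pySetD_of_nonneg l v h0
  have hlt : (j : Int) < (l.set j.toNat v).length := by simp; omega
  rw [hs, PySem.List.pyGetD_eq_getElem _ _ h0 hlt,
      PySem.List.pySetD_of_nonneg _ _ h0,
      List.getElem_set_self (by simpa using h)]
  split_ifs <;> simp [List.set_set]

-- A's first inner loop produces the four (possibly zeroed) 2-bit fields of x.
lemma pvTemp_eq (x : Int) :
    (PySem.List.pyRange 0 4 1).foldl (fun tempArr j =>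
      let tempArr := PySem.List.pySetD tempArr j
        (PySem.Int.band (x >>> (j * 2).toNat) 3)
      if PySem.List.pyGetD tempArr j 0 = 2 then PySem.List.pySetD tempArr j 0 else tempArr)
      (List.replicate 4 0)
    = [pvT x 0, pvT x 1, pvT x 2, pvT x 3] := by
  simp only [show PySem.List.pyRange 0 4 1 = [(0:Int),1,2,3] from rfl, List.foldl]
  rw [pvStep _ 0 _ (by norm_num) (by norm_num),
      pvStep _ 1 _ (by norm_num) (by norm_num),
      pvStep _ 2 _ (by norm_num) (by norm_num),
      pvStep _ 3 _ (by norm_num) (by norm_num)]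
  simp [pvT]

-- A's outer body only rewrites position i = done.length: it stores pvAfun (arr[i]) there.
lemma pvOB_eq (arr : List Int) (jn : Nat) (done rest : List Int) (hd : done.length = jn) :
    pvOB arr (done ++ (0:Int) :: rest) (jn : Int)
      = done ++ pvAfun (arr.getD jn 0) :: rest := by
  subst hd
  unfold pvOB
  simp only [pvTemp_eq (PySem.List.pyGetD arr (done.length : Int) 0)]
  simp only [show PySem.List.pyRange 0 4 1 = [(0:Int),1,2,3] from rfl, List.foldl,
    PySem.List.pySetD_natCast, PySem.List.pyGetD_natCast,
    show ∀ a b c d : Int, PySem.List.pyGetD [a,b,c,d] 0 0 = a from fun _ _ _ _ => rfl,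
    show ∀ a b c d : Int, PySem.List.pyGetD [a,b,c,d] 1 0 = b from fun _ _ _ _ => rfl,
    show ∀ a b c d : Int, PySem.List.pyGetD [a,b,c,d] 2 0 = c from fun _ _ _ _ => rfl,
    show ∀ a b c d : Int, PySem.List.pyGetD [a,b,c,d] 3 0 = d from fun _ _ _ _ => rfl]
  norm_num
  simp [pvAfun]

lemma pv_band3 (x : Int) : PySem.Int.band x 3 = x % 4 := by
  unfold PySem.Int.band
  by_cases hx : 0 ≤ x
  · rw [if_pos hx, if_pos (by norm_num : (0:Int) ≤ 3)]
    have h : x.toNat &&& (3:Int).toNat = x.toNat % 4 := by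
      simpa using Nat.and_two_pow_sub_one_eq_mod x.toNat 2
    rw [h]; omega
  · rw [if_neg hx, if_pos (by norm_num : (0:Int) ≤ 3)]
    have h : (3:Int).toNat &&& (-x - 1).toNat = (-x - 1).toNat % 4 := by
      have := Nat.and_two_pow_sub_one_eq_mod (-x - 1).toNat 2
      simpa [Nat.and_comm] using this
    rw [h]; omega

lemma pv_band255 (x : Int) : PySem.Int.band x 255 = x % 256 := by
  unfold PySem.Int.band
  by_cases hx : 0 ≤ x
  · rw [if_pos hx, if_pos (by norm_num : (0:Int) ≤ 255)]
    have h : x.toNat &&& (255:Int).toNat = x.toNat % 256 := by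
      simpa using Nat.and_two_pow_sub_one_eq_mod x.toNat 8
    rw [h]; omega
  · rw [if_neg hx, if_pos (by norm_num : (0:Int) ≤ 255)]
    have h : (255:Int).toNat &&& (-x - 1).toNat = (-x - 1).toNat % 256 := by
      have := Nat.and_two_pow_sub_one_eq_mod (-x - 1).toNat 8
      simpa [Nat.and_comm] using this
    rw [h]; omega

-- A's per-element value only depends on the low byte of x.
lemma pvAfun_emod (x : Int) : pvAfun x = pvAfun (x % 256) := by
  have h0 : x % 4 = x % 256 % 4 := by omega
  have h1 : x / 4 % 4 = x % 256 / 4 % 4 := by omega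
  have h2 : x / 16 % 4 = x % 256 / 16 % 4 := by omega
  have h3 : x / 64 % 4 = x % 256 / 64 % 4 := by omega
  simp only [pvAfun, pvT, Int.shiftRight_eq_div_pow,
    show ((0 * 2 : Int)).toNat = 0 from rfl, show ((1 * 2 : Int)).toNat = 2 from rfl,
    show ((2 * 2 : Int)).toNat = 4 from rfl, show ((3 * 2 : Int)).toNat = 6 from rfl,
    pv_band3]
  norm_num
  rw [h0, h1, h2, h3]

-- On each of the 256 byte values the two per-element rules agree (checked by computation).
set_option maxRecDepth 4096 in
lemma pv_key256 : ∀ r : Nat, r < 256 → pvAfun (r : Int) = pvFix (r : Int) := by decide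

lemma pvB_elem (x : Int) :
    PySem.List.pyGetD pvTable (PySem.Int.band x 255) 0 = pvFix (x % 256) := by
  rw [pv_band255]
  exact PySem.List.pyGetD_map_pyRange_of_nonneg pvFix 256 (x % 256) 0 (by omega) (by omega)

lemma pv_elem (x : Int) :
    pvAfun x = PySem.List.pyGetD pvTable (PySem.Int.band x 255) 0 := by
  rw [pvB_elem, pvAfun_emod]
  have hx : x % 256 = ((x % 256).toNat : Int) := by omega
  rw [hx]
  exact pv_key256 (x % 256).toNat (by omega)

lemma pvLoop (arr : List Int) :
    ∀ (m j : Nat) (done : List Int), done.length = j → j + m = arr.length →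
    (List.range' j m).foldl (fun acc (k : Nat) => pvOB arr acc (k : Int))
        (done ++ List.replicate m 0)
      = done ++ (arr.drop j).map pvAfun := by
  intro m
  induction m with
  | zero =>
    intro j done hd hl
    simp [List.drop_eq_nil_of_le (by omega : arr.length ≤ j)]
  | succ m ih =>
    intro j done hd hl
    subst hd
    rw [List.range'_succ, List.replicate_succ, List.foldl_cons,
        pvOB_eq arr done.length done (List.replicate m 0) rfl]
    have hj : done.length < arr.length := by omega
    rw [show done ++ pvAfun (arr.getD done.length 0) :: List.replicate m 0
        = (done ++ [pvAfun (arr.getD done.length 0)]) ++ List.replicate m 0 by simp]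
    rw [ih (done.length + 1) (done ++ [pvAfun (arr.getD done.length 0)]) (by simp) (by omega)]
    rw [List.drop_eq_getElem_cons hj, List.map_cons, List.getD_eq_getElem arr 0 hj]
    simp

lemma pvSan_eq_map (arr : List Int) : Sanatize arr = arr.map pvAfun := by
  have hr : PySem.List.pyRange 0 (arr.length : Int) 1
      = (List.range arr.length).map (fun (k : Nat) => (k : Int)) := by
    rw [PySem.List.pyRange_one]; simp
  show (PySem.List.pyRange 0 (arr.length : Int) 1).foldl (pvOB arr)
      (List.replicate arr.length 0) = arr.map pvAfun
  rw [hr, List.foldl_map, List.range_eq_range']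
  have := pvLoop arr arr.length 0 [] rfl (by omega)
  simpa using this

-- ===== VERDICT (by name: the statement is the Claim_ definition above) =====
theorem Sanatize_spec : Claim_equal_Sanatize := by
  intro arr _
  unfold Spec_Sanatize Sanatize_alt
  rw [pvSan_eq_map]
  exact List.map_congr_left (fun x _ => pv_elem x)
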